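-- pv_equiv track=rewrite | github.com/deluxebrain/advent-of-code-2017-python | day_09.py | find_characters_in_garbage
-- ===== SOURCE A (Python) =====
-- def find_characters_in_garbage(tokens):
--     """Count characters contained within garbage blocks."""
--     skip_next = False
--     in_garbage = False
--     garbage = []
--     for token in tokens:
--         if skip_next:
--             skip_next = False
--             continue
--         if token == '!':
--             skip_next = True
--             continue
--         elif token == '<' and not in_garbage:
--             in_garbage = True
--         elif token == '>':
--             in_garbage = False
--         elif in_garbage:
--             garbage.append(token)
--
--     return garbage
-- ===== SOURCE B (Python) =====
-- def find_characters_in_garbage(tokens):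
--     """Count characters contained within garbage blocks."""
--     # Pass 1: strip escape sequences ('!' plus the following token).
--     cleaned = []
--     it = iter(tokens)
--     for token in it:
--         if token == '!':
--             next(it, None)  # drop the escaped token (nothing if '!' is last)
--         else:
--             cleaned.append(token)
--     # Pass 2: two-state scan of the cleaned stream.
--     garbage = []
--     in_garbage = False
--     for token in cleaned:
--         if token == '<' and not in_garbage:
--             in_garbage = True
--         elif token == '>':
--             in_garbage = False
--         elif in_garbage:
--             garbage.append(token)
--     return garbage
-- ===== Notes on version B (the rewrite author's own statement) =====
-- stated objective: alternative
-- what changed: Replaces A's single three-flag loop (skip_next + in_garbage carried together) by two independent passes: an escape-stripping filter that drops each '!' and the token after it, followed by a minimal two-state garbage scanner over the cleaned stream.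
import Mathlib
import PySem

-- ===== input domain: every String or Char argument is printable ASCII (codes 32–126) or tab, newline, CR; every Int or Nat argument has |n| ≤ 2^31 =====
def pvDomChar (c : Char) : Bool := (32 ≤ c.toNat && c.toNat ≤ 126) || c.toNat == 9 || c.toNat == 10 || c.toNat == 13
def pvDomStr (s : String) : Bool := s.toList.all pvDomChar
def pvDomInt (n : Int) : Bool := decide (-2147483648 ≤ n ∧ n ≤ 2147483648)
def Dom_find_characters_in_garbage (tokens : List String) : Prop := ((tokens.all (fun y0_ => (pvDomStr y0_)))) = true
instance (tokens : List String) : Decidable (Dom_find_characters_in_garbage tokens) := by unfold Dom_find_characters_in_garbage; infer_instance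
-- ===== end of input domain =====

-- B splits A's single three-flag loop into two passes: an escape-stripping filter, then a two-state garbage scanner (objective: alternative decomposition, same cost).


-- ===== PORT A =====
-- state: (skip_next, in_garbage, garbage), updated exactly as A's loop body
def fcigStepA (st : Bool × Bool × List String) (token : String) : Bool × Bool × List String :=
  if st.1 then (false, st.2.1, st.2.2)
  else if token == "!" then (true, st.2.1, st.2.2)
  else if token == "<" && !st.2.1 then (false, true, st.2.2)
  else if token == ">" then (false, false, st.2.2)
  else if st.2.1 then (false, st.2.1, st.2.2 ++ [token])
  else (false, st.2.1, st.2.2)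

def find_characters_in_garbage (tokens : List String) : List String :=
  (tokens.foldl fcigStepA (false, false, [])).2.2

-- ===== PORT B =====
-- pass 1: drop every '!' together with the token that follows it
def fcigStrip : List String → List String
  | [] => []
  | t :: rest =>
    if t == "!" then
      match rest with
      | [] => []
      | _ :: rs => fcigStrip rs
    else t :: fcigStrip rest

-- pass 2: two-state scanner, state (in_garbage, garbage)
def fcigScan (st : Bool × List String) (token : String) : Bool × List String :=
  if token == "<" && !st.1 then (true, st.2)
  else if token == ">" then (false, st.2)
  else if st.1 then (st.1, st.2 ++ [token])
  else st

def find_characters_in_garbage_alt (tokens : List String) : List String :=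
  ((fcigStrip tokens).foldl fcigScan (false, [])).2

-- ===== PRECONDITION & SPEC =====
def Spec_find_characters_in_garbage (tokens : List String) (out : List String) : Prop := out = find_characters_in_garbage_alt tokens
instance (tokens : List String) (out : List String) : Decidable (Spec_find_characters_in_garbage tokens out) := by unfold Spec_find_characters_in_garbage; infer_instance

-- ===== CLAIM (what is proved, stated in full; the proofs are below) =====
def Claim_equal_find_characters_in_garbage : Prop := ∀ (tokens : List String), Dom_find_characters_in_garbage tokens → Spec_find_characters_in_garbage tokens (find_characters_in_garbage tokens)

-- ===== LEMMAS AND PROOFS =====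

-- A's fold starting un-skipped equals B's scanner on the stripped stream, for every carried state.
theorem fcig_fold_eq (tokens : List String) :
    ∀ (ing : Bool) (g : List String),
      (tokens.foldl fcigStepA (false, ing, g)).2.2
        = ((fcigStrip tokens).foldl fcigScan (ing, g)).2 := by
  induction tokens using fcigStrip.induct with
  | case1 => intro ing g; rfl
  | case2 t h => intro ing g; simp [fcigStrip, h, List.foldl, fcigStepA]
  | case3 t h r rs ih =>
    intro ing g
    have hs : fcigStrip (t :: r :: rs) = fcigStrip rs := by simp [fcigStrip, h]
    have h1 : fcigStepA (false, ing, g) t = (true, ing, g) := by simp [fcigStepA, h]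
    have h2 : fcigStepA (true, ing, g) r = (false, ing, g) := by simp [fcigStepA]
    rw [hs]
    show ((r :: rs).foldl fcigStepA (fcigStepA (false, ing, g) t)).2.2 = _
    rw [h1]
    show (rs.foldl fcigStepA (fcigStepA (true, ing, g) r)).2.2 = _
    rw [h2]
    exact ih ing g
  | case4 t rest h ih =>
    intro ing g
    have hs : fcigStrip (t :: rest) = t :: fcigStrip rest := by rw [fcigStrip.eq_def]; simp [h]
    have key : fcigStepA (false, ing, g) t = (false, fcigScan (ing, g) t) := by
      simp only [fcigStepA, fcigScan]
      rw [if_neg (by simp), if_neg (by simpa using h)]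
      split_ifs <;> rfl
    rw [hs]
    show (rest.foldl fcigStepA (fcigStepA (false, ing, g) t)).2.2
      = ((fcigStrip rest).foldl fcigScan (fcigScan (ing, g) t)).2
    rw [key]
    rcases fcigScan (ing, g) t with ⟨i2, g2⟩
    exact ih i2 g2

-- ===== VERDICT (by name: the statement is the Claim_ definition above) =====
theorem find_characters_in_garbage_spec : Claim_equal_find_characters_in_garbage := by
  intro tokens _
  unfold Spec_find_characters_in_garbage find_characters_in_garbage find_characters_in_garbage_alt
  exact fcig_fold_eq tokens false []
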